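-- pv_equiv track=rewrite | github.com/fida10/fccPython | buildingATranslator.py | elephantTranslator
-- ===== SOURCE A (Python) =====
-- def elephantTranslator(wordToTranslate):
--     listOfVowels = ['a', 'e', 'i', 'o', 'u'];
--     translation = "";
--     for indivChar in wordToTranslate:
--         if(indivChar.lower() in listOfVowels): # "in" works just like contains, only it works on lists too
--             if(indivChar.isupper()):
--                 translation += 'H';  # append 'H' to translation string if vowel. Above and below if/else accounts for uppercase/lowercase letters
--             else:
--                 translation += 'h';
--
--         else:
--             translation += indivChar; # append regular char to translation if not vowel
--     return translation;
-- ===== SOURCE B (Python) =====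
-- def elephantTranslator(wordToTranslate):
--     # precomputed translation table: each vowel (either case) maps to h/H
--     table = str.maketrans('aeiouAEIOU', 'hhhhhHHHHH')
--     return wordToTranslate.translate(table)
-- ===== Notes on version B (the rewrite author's own statement) =====
-- stated objective: idiomatic
-- what changed: Replaces the explicit loop with its lower()/membership/isupper() branching by a precomputed 10-entry translation table (str.maketrans) and a single str.translate call that looks each character up directly.
import Mathlib
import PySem

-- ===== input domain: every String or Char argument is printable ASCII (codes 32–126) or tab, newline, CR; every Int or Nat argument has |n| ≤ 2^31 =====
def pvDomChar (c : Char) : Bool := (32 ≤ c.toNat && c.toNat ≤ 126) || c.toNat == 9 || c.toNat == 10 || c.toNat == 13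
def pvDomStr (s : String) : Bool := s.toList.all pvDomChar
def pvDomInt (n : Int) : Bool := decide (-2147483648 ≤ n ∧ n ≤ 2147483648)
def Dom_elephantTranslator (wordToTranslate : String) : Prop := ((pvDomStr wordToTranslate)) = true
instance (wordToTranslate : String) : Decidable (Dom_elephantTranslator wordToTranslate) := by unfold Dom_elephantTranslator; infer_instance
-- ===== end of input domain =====

-- B replaces A's per-character lower()/membership/isupper() branching by a precomputed
-- 10-entry translation table looked up once per character (idiomatic str.translate).

-- ===== PORT A =====
-- literal port of A: accumulate `translation`, per char branch on lowered membership and isupper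
def elephantTranslator (wordToTranslate : String) : String :=
  let listOfVowels : List Char := ['a', 'e', 'i', 'o', 'u']
  let translation : List Char :=
    wordToTranslate.toList.foldl
      (fun translation indivChar =>
        if PySem.Chars.lowerChar indivChar ∈ listOfVowels then
          if PySem.Chars.isupper indivChar then
            translation ++ ['H']
          else
            translation ++ ['h']
        else
          translation ++ [indivChar])
      []
  String.mk translation

-- ===== PORT B =====
-- B-side helper: the table built by str.maketrans('aeiouAEIOU', 'hhhhhHHHHH')
def pvTable_elephantTranslator : PySem.Dict Char Char :=
  (List.zip "aeiouAEIOU".toList "hhhhhHHHHH".toList).foldl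
    (fun d p => d.insert p.1 p.2) PySem.Dict.empty

-- str.translate: map each char through the table, identity where absent
def elephantTranslator_alt (wordToTranslate : String) : String :=
  String.mk (wordToTranslate.toList.map
    (fun c => pvTable_elephantTranslator.getD c c))

-- ===== PRECONDITION & SPEC =====
def Spec_elephantTranslator (wordToTranslate : String) (out : String) : Prop := out = elephantTranslator_alt wordToTranslate
instance (wordToTranslate : String) (out : String) : Decidable (Spec_elephantTranslator wordToTranslate out) := by unfold Spec_elephantTranslator; infer_instance

-- ===== CLAIM (what is proved, stated in full; the proofs are below) =====
def Claim_equal_elephantTranslator : Prop := ∀ (wordToTranslate : String), Dom_elephantTranslator wordToTranslate → Spec_elephantTranslator wordToTranslate (elephantTranslator wordToTranslate)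

-- ===== LEMMAS AND PROOFS =====

-- per-character translation A performs
def pvChA (c : Char) : Char :=
  if PySem.Chars.lowerChar c ∈ ['a', 'e', 'i', 'o', 'u'] then
    (if PySem.Chars.isupper c then 'H' else 'h')
  else c

-- A's loop is the map of pvChA
lemma pvLoopA (l acc : List Char) :
    l.foldl
      (fun translation indivChar =>
        if PySem.Chars.lowerChar indivChar ∈ ['a', 'e', 'i', 'o', 'u'] then
          if PySem.Chars.isupper indivChar then
            translation ++ ['H']
          else
            translation ++ ['h']
        else
          translation ++ [indivChar])
      acc = acc ++ l.map pvChA := by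
  induction l generalizing acc with
  | nil => simp
  | cons c t ih =>
      simp only [List.foldl_cons, List.map_cons, ih, pvChA]
      split_ifs <;> simp

-- on every domain character A's branch and B's table lookup agree
lemma pvStep_eq (c : Char) (hc : pvDomChar c = true) :
    pvChA c = pvTable_elephantTranslator.getD c c := by
  have h : c.toNat < 128 := by
    unfold pvDomChar at hc; simp at hc; omega
  have key : ∀ n : Nat, n < 128 →
      pvChA (Char.ofNat n) = pvTable_elephantTranslator.getD (Char.ofNat n) (Char.ofNat n) := by
    set_option maxRecDepth 4096 in decide
  have := key c.toNat h
  rwa [Char.ofNat_toNat] at this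

-- ===== VERDICT (by name: the statement is the Claim_ definition above) =====
theorem elephantTranslator_spec : Claim_equal_elephantTranslator := by
  intro w hdom
  unfold Spec_elephantTranslator elephantTranslator elephantTranslator_alt
  simp only [pvLoopA, List.nil_append]
  congr 1
  refine List.map_congr_left ?_
  intro c hc
  exact pvStep_eq c (by
    have := (List.all_eq_true.mp hdom) c hc
    simpa using this)
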